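-- pv_equiv track=rewrite | github.com/CarlosAdrianM/odoo-custom-addons | nesto_sync/models/phone_processor.py | process_phone_numbers
-- ===== SOURCE A (Python) =====
-- def process_phone_numbers(phone_numbers_str):
--     """ Separa los números de teléfono en móvil, fijo y adicionales. """
--     if not phone_numbers_str:
--         return None, None, None
--
--     phone_numbers = phone_numbers_str.split("/")
--     mobile, phone, additional_phones = None, None, []
--
--     for num in phone_numbers:
--         clean_num = num.strip()
--         if clean_num.startswith(("6", "7")) and not mobile:
--             mobile = clean_num
--         elif not clean_num.startswith(("6", "7")) and not phone:
--             phone = clean_num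
--         else:
--             additional_phones.append(clean_num)
--
--     extra_phones = " / ".join(additional_phones) if additional_phones else None
--     return mobile, phone, extra_phones
-- ===== SOURCE B (Python) =====
-- def process_phone_numbers(phone_numbers_str):
--     """ Separa los números de teléfono en móvil, fijo y adicionales. """
--     if not phone_numbers_str:
--         return None, None, None
--
--     tokens = [t for t in (p.strip() for p in phone_numbers_str.split("/")) if t]
--
--     mobile_idx = next((i for i, t in enumerate(tokens) if t.startswith(("6", "7"))), None)
--     phone_idx = next((i for i, t in enumerate(tokens) if not t.startswith(("6", "7"))), None)
--
--     mobile = tokens[mobile_idx] if mobile_idx is not None else None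
--     phone = tokens[phone_idx] if phone_idx is not None else None
--
--     additional = [t for i, t in enumerate(tokens) if i != mobile_idx and i != phone_idx]
--     return mobile, phone, " / ".join(additional) if additional else None
-- ===== Notes on version B (the rewrite author's own statement) =====
-- stated objective: simpler
-- what changed: Replaces A's single stateful classification loop (mutable mobile/phone slots tested by Python truthiness) with an index-first decomposition: clean the chunks and drop empty ones, locate the index of the first mobile-like token and of the first other token, read the two values off those positions, and build the additional list as one order-preserving filter over the enumerated tokens.
-- intended difference: On non-empty inputs where some slash-separated chunk strips to nothing and that chunk lies after the first real landline chunk (or no real landline chunk exists at all), A leaks loop state: it returns an empty string in the phone slot or inserts empty entries into the additional string; B ignores empty chunks (phone stays None, empties are dropped), which is the intended parsing of a phone list. — e.g. on process_phone_numbers(some "/"): A returns (none, some "", none), B returns (none, none, none)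
import Mathlib
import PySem

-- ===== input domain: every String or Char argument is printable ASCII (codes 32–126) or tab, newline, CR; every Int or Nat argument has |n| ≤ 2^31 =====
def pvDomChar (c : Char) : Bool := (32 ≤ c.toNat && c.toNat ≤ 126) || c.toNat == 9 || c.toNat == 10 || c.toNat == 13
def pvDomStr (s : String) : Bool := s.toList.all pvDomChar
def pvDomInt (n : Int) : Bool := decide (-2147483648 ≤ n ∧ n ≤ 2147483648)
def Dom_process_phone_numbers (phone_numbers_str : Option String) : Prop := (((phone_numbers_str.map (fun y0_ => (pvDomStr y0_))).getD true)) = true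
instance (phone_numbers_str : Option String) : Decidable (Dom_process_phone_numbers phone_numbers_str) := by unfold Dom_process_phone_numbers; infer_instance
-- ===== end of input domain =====

-- B replaces A's single stateful classification loop by an index-first decomposition over the
-- nonempty cleaned chunks; on strings with empty chunks after the first landline chunk (or with
-- no landline chunk) A leaks loop state (empty-string phone, empty additional entries) and B drops them (D_ below).

-- ===== PORT A =====

-- Python truthiness of an Optional[str] variable: falsy = None or "".
def pyTruthyS : Option String → Bool
  | none => false
  | some s => !(s == "")

-- clean_num.startswith(("6", "7"))
def pv_isMob67 (t : String) : Bool := PySem.Str.startswith t "6" || PySem.Str.startswith t "7"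

-- the for-loop of A, state (mobile, phone, additional_phones)
def pvA_loop : List String → Option String × Option String × List String → Option String × Option String × List String
  | [], st => st
  | num :: rest, (mobile, phone, additional) =>
      let clean_num := PySem.Str.strip num
      if pv_isMob67 clean_num && !pyTruthyS mobile then
        pvA_loop rest (some clean_num, phone, additional)
      else if !pv_isMob67 clean_num && !pyTruthyS phone then
        pvA_loop rest (mobile, some clean_num, additional)
      else
        pvA_loop rest (mobile, phone, additional ++ [clean_num])

def process_phone_numbers (phone_numbers_str : Option String) : Option String × Option String × Option String :=
  if !pyTruthyS phone_numbers_str then (none, none, none)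
  else
    match phone_numbers_str with
    | none => (none, none, none)
    | some s =>
      let phone_numbers := (PySem.Str.split? s "/").getD []
      let res := pvA_loop phone_numbers (none, none, [])
      let extra_phones := if res.2.2 == [] then none else some (PySem.Str.join " / " res.2.2)
      (res.1, res.2.1, extra_phones)

-- ===== PORT B =====

-- next((i for i, t in enumerate(tokens) if p t), None)
def pvB_first (p : String → Bool) : List (Int × String) → Option Int
  | [] => none
  | (i, t) :: rest => if p t then some i else pvB_first p rest

def process_phone_numbers_alt (phone_numbers_str : Option String) : Option String × Option String × Option String :=
  match phone_numbers_str with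
  | none => (none, none, none)
  | some s =>
    if s == "" then (none, none, none)
    else
      -- tokens = the stripped '/'-chunks that are nonempty
      let tokens := (((PySem.Str.split? s "/").getD []).map PySem.Str.strip).filter (fun t => !(t == ""))
      let en := PySem.List.enumerate tokens
      let mobileIdx := pvB_first pv_isMob67 en
      let phoneIdx := pvB_first (fun t => !pv_isMob67 t) en
      let mobile := match mobileIdx with
        | some i => some ((PySem.List.pyGet? tokens i).getD "")
        | none => none
      let phone := match phoneIdx with
        | some i => some ((PySem.List.pyGet? tokens i).getD "")
        | none => none
      let additional := (en.filter (fun pr => !(mobileIdx == some pr.1) && !(phoneIdx == some pr.1))).map (·.2)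
      (mobile, phone, if additional == [] then none else some (PySem.Str.join " / " additional))

-- ===== PRECONDITION & SPEC =====

-- ASCII whitespace (the only whitespace admitted by Dom_process_phone_numbers)
def pvWS (c : Char) : Bool := c.toNat == 32 || c.toNat == 9 || c.toNat == 10 || c.toNat == 13

-- a "real landline" chunk: some non-whitespace content, starting with a character other than '6'/'7'
def pvLandRaw (w : List Char) : Bool :=
  match w.dropWhile pvWS with
  | [] => false
  | c :: _ => !(c == '6' || c == '7')

-- true iff every all-whitespace '/'-chunk comes before the first real landline chunk (which must then exist)
def pvGood (s : String) : Bool :=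
  let ws := s.toList.splitOn '/'
  (ws.drop (((ws.findIdx? pvLandRaw).map (· + 1)).getD 0)).all (fun w => !w.all pvWS)

-- On non-empty strings with an empty cleaned chunk after the first real landline chunk (or with no
-- real landline chunk at all), A leaks loop state — an empty-string phone or empty entries in
-- additional — while B ignores empty chunks (phone None, empties dropped), the intended parsing of a phone list.
def D_process_phone_numbers (phone_numbers_str : Option String) : Prop :=
  phone_numbers_str.getD "" ≠ "" ∧ pvGood (phone_numbers_str.getD "") = false
instance (phone_numbers_str : Option String) : Decidable (D_process_phone_numbers phone_numbers_str) := by unfold D_process_phone_numbers; infer_instance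

def Spec_process_phone_numbers (phone_numbers_str : Option String) (out : Option String × Option String × Option String) : Prop := ¬ D_process_phone_numbers phone_numbers_str → out = process_phone_numbers_alt phone_numbers_str
instance (phone_numbers_str : Option String) (out : Option String × Option String × Option String) : Decidable (Spec_process_phone_numbers phone_numbers_str out) := by unfold Spec_process_phone_numbers; infer_instance

def pvDiffWitness_process_phone_numbers : Option String := some "/"
def pvDiffWitnessOut_process_phone_numbers : (Option String × Option String × Option String) × (Option String × Option String × Option String) :=
  ((none, some "", none), (none, none, none))

-- ===== CLAIM (what is proved, stated in full; the proofs are below) =====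
def Claim_unchanged_process_phone_numbers : Prop := ∀ (phone_numbers_str : Option String), Dom_process_phone_numbers phone_numbers_str → Spec_process_phone_numbers phone_numbers_str (process_phone_numbers phone_numbers_str)
def Claim_changed_process_phone_numbers : Prop := Dom_process_phone_numbers (pvDiffWitness_process_phone_numbers) ∧ D_process_phone_numbers (pvDiffWitness_process_phone_numbers) ∧ process_phone_numbers (pvDiffWitness_process_phone_numbers) = pvDiffWitnessOut_process_phone_numbers.1 ∧ process_phone_numbers_alt (pvDiffWitness_process_phone_numbers) = pvDiffWitnessOut_process_phone_numbers.2 ∧ pvDiffWitnessOut_process_phone_numbers.1 ≠ pvDiffWitnessOut_process_phone_numbers.2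

-- ===== LEMMAS AND PROOFS =====

theorem mob_ne_empty (t : String) (h : pv_isMob67 t = true) : (t == "") = false := by
  simp only [pv_isMob67, PySem.Str.startswith_eq, PySem.Chars.startswith] at h
  simp only [beq_eq_false_iff_ne, ne_eq]
  rintro rfl
  revert h; decide

-- the phone-slot predicate on cleaned tokens: non-mobile and nonempty
def pvQ (t : String) : Bool := !pv_isMob67 t && !(t == "")

-- the proof-side view of the cleaned chunks, as Strings (A's phone_numbers list, stripped)
def pvToks (s : String) : List String := ((PySem.Str.split? s "/").getD []).map PySem.Str.strip

theorem toList_empty_eq (t : String) : t.toList.isEmpty = (t == "") := by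
  rw [Bool.eq_iff_iff]
  rw [List.isEmpty_iff, beq_iff_eq, ← String.toList_inj]
  exact Iff.rfl

-- proof-side view of a chunk: trimmed characters and the head test
def pvTrim (cs : List Char) : List Char :=
  (((cs.dropWhile pvWS).reverse.dropWhile pvWS)).reverse

def pvHeadIn67 (cs : List Char) : Bool :=
  match cs.head? with
  | some c => c == '6' || c == '7'
  | none => false

def pvLandlineC (cs : List Char) : Bool := !cs.isEmpty && !pvHeadIn67 cs

theorem dropWhile_append_singleton (p : Char → Bool) (l : List Char) (c : Char)
    (h : p c = false) : (l ++ [c]).dropWhile p = l.dropWhile p ++ [c] := by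
  induction l with
  | nil => simp [List.dropWhile, h]
  | cons a l ih =>
    rw [List.cons_append, List.dropWhile_cons, List.dropWhile_cons]
    split_ifs with ha
    · exact ih
    · rfl

theorem dropWhile_head_false (p : Char → Bool) (w : List Char) (c : Char) (r : List Char)
    (h : w.dropWhile p = c :: r) : p c = false := by
  induction w with
  | nil => simp at h
  | cons a l ih =>
    rw [List.dropWhile_cons] at h
    split_ifs at h with ha
    · exact ih h
    · obtain ⟨rfl, -⟩ := List.cons.inj h
      simpa using ha

theorem landRaw_eq (w : List Char) : pvLandRaw w = pvLandlineC (pvTrim w) := by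
  cases h : w.dropWhile pvWS with
  | nil => simp [pvLandRaw, h, pvTrim, pvLandlineC]
  | cons c r =>
    have hc : pvWS c = false := dropWhile_head_false pvWS w c r h
    unfold pvLandRaw pvTrim
    rw [h, show (c :: r).reverse = r.reverse ++ [c] by simp,
      dropWhile_append_singleton pvWS _ c hc]
    simp [pvLandlineC, pvHeadIn67]

theorem blank_eq (w : List Char) : w.all pvWS = (pvTrim w).isEmpty := by
  cases h : w.dropWhile pvWS with
  | nil =>
    have hall : ∀ c ∈ w, pvWS c = true := List.dropWhile_eq_nil_iff.mp h
    simp [pvTrim, h, List.all_eq_true.mpr hall]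
  | cons c r =>
    have hc : pvWS c = false := dropWhile_head_false pvWS w c r h
    have hmem : c ∈ w := (List.dropWhile_sublist pvWS).subset (by rw [h]; simp)
    have : w.all pvWS = false := by
      rw [List.all_eq_false]
      exact ⟨c, hmem, by simp [hc]⟩
    rw [this, pvTrim, h, show (c :: r).reverse = r.reverse ++ [c] by simp,
      dropWhile_append_singleton pvWS _ c hc]
    simp

theorem landlineC_toList (t : String) : pvLandlineC t.toList = pvQ t := by
  have h1 : pvHeadIn67 t.toList = pv_isMob67 t := by
    simp only [pvHeadIn67, pv_isMob67, PySem.Str.startswith_eq, PySem.Chars.startswith]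
    cases h : t.toList with
    | nil => simp
    | cons c cs =>
      show _ = ((List.isPrefixOf ['6'] (c :: cs)) || (List.isPrefixOf ['7'] (c :: cs)))
      simp [List.isPrefixOf, BEq.comm]
  simp only [pvLandlineC, pvQ, h1, toList_empty_eq, Bool.and_comm]

-- proof-side splitter mirroring PySem's splitOn
def pvSplitSlash : List Char → List (List Char)
  | [] => [[]]
  | c :: cs =>
    if c == '/' then [] :: pvSplitSlash cs
    else
      match pvSplitSlash cs with
      | [] => [[c]]
      | w :: ws => (c :: w) :: ws

theorem pvSplitSlash_ne_nil (l : List Char) : pvSplitSlash l ≠ [] := by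
  cases l with
  | nil => simp [pvSplitSlash]
  | cons c cs =>
    by_cases hc : (c == '/') = true
    · simp [pvSplitSlash, hc]
    · simp only [pvSplitSlash, hc, if_false, Bool.false_eq_true]
      cases pvSplitSlash cs <;> simp

theorem go_spec (fuel : Nat) : ∀ (l cur : List Char) (acc : List (List Char)), l.length ≤ fuel →
    PySem.Chars.splitOn.go ['/'] fuel l cur acc =
      acc.reverse ++ (match pvSplitSlash l with
                      | [] => []
                      | w :: ws => (cur.reverse ++ w) :: ws) := by
  induction fuel with
  | zero =>
    intro l cur acc h
    have hl : l = [] := List.eq_nil_of_length_eq_zero (Nat.le_zero.mp h)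
    subst hl
    simp [PySem.Chars.splitOn.go, pvSplitSlash]
  | succ fuel ih =>
    intro l cur acc h
    cases l with
    | nil => simp [PySem.Chars.splitOn.go, pvSplitSlash]
    | cons c rest =>
      have hstep : PySem.Chars.splitOn.go ['/'] (fuel + 1) (c :: rest) cur acc =
          if (['/'] : List Char).isPrefixOf (c :: rest) then
            PySem.Chars.splitOn.go ['/'] fuel (List.drop (['/'] : List Char).length (c :: rest)) []
              (cur.reverse :: acc)
          else PySem.Chars.splitOn.go ['/'] fuel rest (c :: cur) acc := rfl
      rw [hstep]
      have hle : rest.length ≤ fuel := by simpa using h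
      by_cases hc : c = '/'
      · subst hc
        rw [if_pos (by simp [List.isPrefixOf])]
        rw [show List.drop (['/'] : List Char).length ('/' :: rest) = rest from rfl]
        rw [ih rest [] _ hle]
        obtain ⟨w, ws, hw⟩ := List.exists_cons_of_ne_nil (pvSplitSlash_ne_nil rest)
        simp [pvSplitSlash, hw]
      · rw [if_neg (by simp [List.isPrefixOf]; exact fun hEq => hc hEq.symm)]
        rw [ih rest (c :: cur) acc hle]
        obtain ⟨w, ws, hw⟩ := List.exists_cons_of_ne_nil (pvSplitSlash_ne_nil rest)
        simp only [pvSplitSlash, beq_iff_eq, hc, if_false, hw]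
        simp

theorem splitOn_eq_pvSplit (l : List Char) : l.splitOn '/' = pvSplitSlash l := by
  have hP : ∀ m : List Char, m.splitOnP (· == '/') = pvSplitSlash m := by
    intro m
    induction m with
    | nil => rfl
    | cons c cs ih =>
      rw [List.splitOnP_cons, ih]
      by_cases hc : (c == '/') = true
      · rw [if_pos hc]
        simp only [pvSplitSlash, hc, if_true]
      · rw [if_neg hc]
        obtain ⟨w, ws, hw⟩ := List.exists_cons_of_ne_nil (pvSplitSlash_ne_nil cs)
        simp only [pvSplitSlash, hc, if_false, Bool.false_eq_true, hw, List.modifyHead_cons]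
  exact hP l

theorem splitOn_eq (l : List Char) : PySem.Chars.splitOn l ['/'] = pvSplitSlash l := by
  unfold PySem.Chars.splitOn
  rw [go_spec (l.length + 1) l [] [] (by omega)]
  obtain ⟨w, ws, hw⟩ := List.exists_cons_of_ne_nil (pvSplitSlash_ne_nil l)
  simp [hw]

-- every character of a chunk occurs in the input
theorem mem_pvSplitSlash (l : List Char) :
    ∀ w ∈ pvSplitSlash l, ∀ c ∈ w, c ∈ l := by
  induction l with
  | nil => simp [pvSplitSlash]
  | cons a cs ih =>
    intro w hw c hc
    by_cases ha : (a == '/') = true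
    · simp only [pvSplitSlash, ha, if_true, List.mem_cons] at hw
      rcases hw with rfl | hw
      · simp at hc
      · exact List.mem_cons_of_mem _ (ih w hw c hc)
    · simp only [pvSplitSlash, ha, if_false, Bool.false_eq_true] at hw
      obtain ⟨w0, ws, hw0⟩ := List.exists_cons_of_ne_nil (pvSplitSlash_ne_nil cs)
      rw [hw0] at hw
      simp only [List.mem_cons] at hw
      rcases hw with rfl | hw
      · rcases List.mem_cons.mp hc with rfl | hc
        · simp
        · exact List.mem_cons_of_mem _ (ih w0 (by rw [hw0]; exact List.mem_cons_self) c hc)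
      · exact List.mem_cons_of_mem _ (ih w (by rw [hw0]; exact List.mem_cons_of_mem _ hw) c hc)

theorem ws_eq_isspace (c : Char) (h : pvDomChar c = true) : pvWS c = PySem.Chars.isspace c := by
  rw [Bool.eq_iff_iff]
  simp only [pvDomChar, Bool.or_eq_true, Bool.and_eq_true, decide_eq_true_eq, beq_iff_eq] at h ⊢
  simp only [pvWS, PySem.Chars.isspace, Bool.or_eq_true, Bool.and_eq_true, decide_eq_true_eq,
    beq_iff_eq]
  omega

theorem dropWhile_congr_mem (p q : Char → Bool) (l : List Char)
    (h : ∀ c ∈ l, p c = q c) : l.dropWhile p = l.dropWhile q := by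
  induction l with
  | nil => rfl
  | cons c cs ih =>
    rw [List.dropWhile_cons, List.dropWhile_cons, h c (by simp)]
    split_ifs with hq
    · exact ih (fun c hc => h c (List.mem_cons_of_mem _ hc))
    · rfl

theorem trim_eq_strip (w : List Char) (h : ∀ c ∈ w, pvDomChar c = true) :
    pvTrim w = PySem.Chars.strip w := by
  unfold pvTrim PySem.Chars.strip PySem.Chars.lstrip PySem.Chars.rstrip
  rw [dropWhile_congr_mem pvWS PySem.Chars.isspace w (fun c hc => ws_eq_isspace c (h c hc))]
  congr 1
  refine dropWhile_congr_mem pvWS PySem.Chars.isspace _ (fun c hc => ws_eq_isspace c (h c ?_))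
  have h1 := List.mem_reverse.mp hc
  exact (List.dropWhile_sublist _).subset h1

theorem raw_land_eq (t : String) (h : ∀ c ∈ t.toList, pvDomChar c = true) :
    pvLandRaw t.toList = pvQ (PySem.Str.strip t) := by
  rw [landRaw_eq, trim_eq_strip t.toList h, ← PySem.Str.toList_strip, landlineC_toList]

theorem raw_blank_eq (t : String) (h : ∀ c ∈ t.toList, pvDomChar c = true) :
    t.toList.all pvWS = (PySem.Str.strip t == "") := by
  rw [blank_eq, trim_eq_strip t.toList h, ← PySem.Str.toList_strip, toList_empty_eq]

theorem findIdx?_congr_mem {α : Type} (p q : α → Bool) (l : List α)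
    (h : ∀ x ∈ l, p x = q x) : l.findIdx? p = l.findIdx? q := by
  induction l with
  | nil => rfl
  | cons a l ih =>
    rw [List.findIdx?_cons, List.findIdx?_cons, h a (by simp),
      ih (fun x hx => h x (List.mem_cons_of_mem _ hx))]

theorem all_congr_mem {α : Type} (p q : α → Bool) (l : List α)
    (h : ∀ x ∈ l, p x = q x) : l.all p = l.all q := by
  induction l with
  | nil => rfl
  | cons a l ih =>
    rw [List.all_cons, List.all_cons, h a (by simp),
      ih (fun x hx => h x (List.mem_cons_of_mem _ hx))]

theorem pvGood_eq (s : String) (hdom : pvDomStr s = true) :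
    pvGood s =
      (match (pvToks s).findIdx? pvQ with
       | none => (pvToks s).all (fun t => !(t == ""))
       | some k => ((pvToks s).drop (k + 1)).all (fun t => !(t == ""))) := by
  have hsp : PySem.Chars.split? s.toList ("/" : String).toList = some (pvSplitSlash s.toList) := by
    rw [show ("/" : String).toList = ['/'] from rfl]
    unfold PySem.Chars.split?
    rw [if_neg (by simp), splitOn_eq]
  have hmap := PySem.Str.split?_map s "/"
  rw [hsp] at hmap
  cases hq : PySem.Str.split? s "/" with
  | none => rw [hq] at hmap; exact absurd hmap (by simp)
  | some L =>
    rw [hq] at hmap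
    simp only [Option.map_some, Option.some.injEq] at hmap
    have hdomc : ∀ t ∈ L, ∀ c ∈ t.toList, pvDomChar c = true := by
      intro t ht c hc
      have hw : t.toList ∈ pvSplitSlash s.toList := by
        rw [← hmap]; exact List.mem_map_of_mem ht
      exact List.all_eq_true.mp hdom c (mem_pvSplitSlash s.toList t.toList hw c hc)
    have htoksL : pvToks s = L.map PySem.Str.strip := by
      unfold pvToks; rw [hq]; rfl
    simp only [pvGood, splitOn_eq_pvSplit]
    rw [← hmap, List.findIdx?_map,
      findIdx?_congr_mem (pvLandRaw ∘ String.toList) (fun t => pvQ (PySem.Str.strip t)) L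
        (fun t ht => raw_land_eq t (hdomc t ht)),
      show (fun t => pvQ (PySem.Str.strip t)) = (pvQ ∘ PySem.Str.strip) from rfl,
      ← List.findIdx?_map, ← htoksL]
    cases hf : (pvToks s).findIdx? pvQ with
    | none =>
      simp only [Option.map_none, Option.getD_none, List.drop_zero]
      rw [List.all_map,
        all_congr_mem ((fun w => !w.all pvWS) ∘ String.toList) (fun t => !(PySem.Str.strip t == "")) L
          (fun t ht => congrArg (fun b => !b) (raw_blank_eq t (hdomc t ht))),
        show (fun t => !(PySem.Str.strip t == "")) = ((fun t => !(t == "")) ∘ PySem.Str.strip) from rfl,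
        ← List.all_map, ← htoksL]
    | some k =>
      simp only [Option.map_some, Option.getD_some]
      rw [← List.map_drop, List.all_map,
        all_congr_mem ((fun w => !w.all pvWS) ∘ String.toList) (fun t => !(PySem.Str.strip t == ""))
          (List.drop (k + 1) L)
          (fun t ht => congrArg (fun b => !b) (raw_blank_eq t (hdomc t (List.mem_of_mem_drop ht)))),
        show (fun t => !(PySem.Str.strip t == "")) = ((fun t => !(t == "")) ∘ PySem.Str.strip) from rfl,
        ← List.all_map, List.map_drop, ← htoksL]

-- the common specification state machine for the "additional" list
def addSpec (mo ph : Bool) : List String → List String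
  | [] => []
  | t :: ts =>
    if pv_isMob67 t && !mo then addSpec true ph ts
    else if !pv_isMob67 t && !ph then addSpec mo (!(t == "")) ts
    else t :: addSpec mo ph ts

-- A's loop with stripping fused out: the same loop over pre-cleaned tokens
def pvAC : List String → Option String × Option String × List String → Option String × Option String × List String
  | [], st => st
  | t :: rest, (mobile, phone, additional) =>
      if pv_isMob67 t && !pyTruthyS mobile then
        pvAC rest (some t, phone, additional)
      else if !pv_isMob67 t && !pyTruthyS phone then
        pvAC rest (mobile, some t, additional)
      else
        pvAC rest (mobile, phone, additional ++ [t])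

theorem pvA_loop_eq_AC (nums : List String) (st : Option String × Option String × List String) :
    pvA_loop nums st = pvAC (nums.map PySem.Str.strip) st := by
  induction nums generalizing st with
  | nil => rfl
  | cons n rest ih =>
    obtain ⟨mo, ph, acc⟩ := st
    simp only [pvA_loop, pvAC, List.map_cons]
    split_ifs <;> exact ih _

def moRes (mo : Option String) (ts : List String) : Option String :=
  if pyTruthyS mo then mo else
    match ts.find? pv_isMob67 with
    | some t => some t
    | none => mo

def phRes (ph : Option String) (ts : List String) : Option String :=
  if pyTruthyS ph then ph else
    match ts.find? pvQ with
    | some t => some t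
    | none => if ts.any (fun t => !pv_isMob67 t) then some "" else ph

theorem pvAC_char (ts : List String) (mo ph : Option String) (acc : List String) :
    pvAC ts (mo, ph, acc) =
      (moRes mo ts, phRes ph ts, acc ++ addSpec (pyTruthyS mo) (pyTruthyS ph) ts) := by
  induction ts generalizing mo ph acc with
  | nil => simp [pvAC, moRes, phRes, addSpec]
  | cons t rest ih =>
    simp only [pvAC, addSpec]
    by_cases hm : pv_isMob67 t = true
    · have hfq : List.find? pvQ (t :: rest) = List.find? pvQ rest :=
        List.find?_cons_of_neg (by simp [pvQ, hm])
      by_cases hmo : pyTruthyS mo = true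
      · rw [if_neg (by simp [hm, hmo]), if_neg (by simp [hm]), ih]
        refine Prod.ext ?_ (Prod.ext ?_ ?_)
        · simp [moRes, hmo]
        · simp [phRes, hfq, hm]
        · simp [hm, hmo]
      · rw [if_pos (by simp [hm, hmo]), ih]
        have htr : pyTruthyS (some t) = true := by simp [pyTruthyS, mob_ne_empty t hm]
        have hfm : List.find? pv_isMob67 (t :: rest) = some t := List.find?_cons_of_pos hm
        refine Prod.ext ?_ (Prod.ext ?_ ?_)
        · simp [moRes, htr, hmo, hfm]
        · simp [phRes, hfq, hm]
        · simp [hm, hmo, htr]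
    · have hfm : List.find? pv_isMob67 (t :: rest) = List.find? pv_isMob67 rest :=
        List.find?_cons_of_neg (by simp [hm])
      by_cases hph : pyTruthyS ph = true
      · rw [if_neg (by simp [hm]), if_neg (by simp [hph]), ih]
        refine Prod.ext ?_ (Prod.ext ?_ ?_)
        · simp [moRes, hfm]
        · simp [phRes, hph]
        · simp [hm, hph]
      · rw [if_neg (by simp [hm]), if_pos (by simp [hm, hph]), ih]
        have hty : pyTruthyS (some t) = !(t == "") := by simp [pyTruthyS]
        refine Prod.ext ?_ (Prod.ext ?_ ?_)
        · simp [moRes, hfm]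
        · by_cases he : (t == "") = true
          · have hfq : List.find? pvQ (t :: rest) = List.find? pvQ rest :=
              List.find?_cons_of_neg (by simp [pvQ, he])
            simp [phRes, hty, he, hph, hfq, hm]
            cases hf : List.find? pvQ rest <;> simp
            exact fun _ => by simpa using he
          · have hfq : List.find? pvQ (t :: rest) = some t :=
              List.find?_cons_of_pos (by simp [pvQ, hm, he])
            simp [phRes, hty, he, hph, hfq]
        · simp [hm, hph, hty]

theorem pvB_first_enum (p : String → Bool) (ts : List String) (s : Int) :
    pvB_first p (PySem.List.enumerate ts s) = (ts.findIdx? p).map (fun n : Nat => s + (n : Int)) := by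
  induction ts generalizing s with
  | nil => simp [pvB_first, PySem.List.enumerate_nil]
  | cons t rest ih =>
    by_cases hp : p t
    · simp [PySem.List.enumerate_cons, pvB_first, List.findIdx?_cons, hp]
    · simp only [PySem.List.enumerate_cons, pvB_first, List.findIdx?_cons, hp, if_false,
        Bool.false_eq_true]
      rw [ih]
      cases List.findIdx? p rest <;> simp
      ring

theorem get_findIdx (p : String → Bool) (ts : List String) :
    (match ts.findIdx? p with
     | some n => some ((PySem.List.pyGet? ts (n : Int)).getD "")
     | none => (none : Option String)) = ts.find? p := by
  induction ts with
  | nil => simp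
  | cons t rest ih =>
    rw [List.findIdx?_cons]
    by_cases hp : p t
    · rw [if_pos hp, List.find?_cons_of_pos hp]
      simp [PySem.List.pyGet?, PySem.List.pyIdx?]
    · rw [if_neg hp, List.find?_cons_of_neg hp, ← ih]
      cases List.findIdx? p rest
      · simp
      · simp [PySem.List.pyGet?_natCast]

theorem idxShift (p : String → Bool) (t : String) (rest : List String) (k : Nat)
    (h : p t = false) :
    ((t :: rest).findIdx? p).map (fun n : Nat => (k : Int) + n) =
      (rest.findIdx? p).map (fun n : Nat => ((k + 1 : Nat) : Int) + n) := by
  rw [List.findIdx?_cons, if_neg (by simp [h])]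
  cases rest.findIdx? p <;> simp
  ring

-- a shifted index is never the current position
theorem shift_ne_self (p : String → Bool) (t : String) (rest : List String) (k : Nat)
    (h : p t = false) :
    (((t :: rest).findIdx? p).map (fun n : Nat => (k : Int) + n) == some (k : Int)) = false := by
  rw [List.findIdx?_cons, if_neg (by simp [h])]
  cases rest.findIdx? p <;> simp
  omega

-- find? of mobile-like tokens ignores empty tokens
theorem find_mob_filter (ts : List String) :
    ts.find? pv_isMob67 = (ts.filter (fun t => !(t == ""))).find? pv_isMob67 := by
  induction ts with
  | nil => rfl
  | cons t rest ih =>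
    by_cases he : (t == "") = true
    · have hm : pv_isMob67 t = false := by
        by_contra h
        rw [mob_ne_empty t (by simpa using h)] at he
        exact absurd he (by simp)
      rw [List.filter_cons_of_neg (by simp [he]), List.find?_cons_of_neg (by simp [hm]), ih]
    · rw [List.filter_cons_of_pos (by simp [he])]
      by_cases hm : pv_isMob67 t = true
      · rw [List.find?_cons_of_pos hm, List.find?_cons_of_pos hm]
      · rw [List.find?_cons_of_neg (by simpa using hm),
          List.find?_cons_of_neg (by simpa using hm), ih]

-- first real landline token = first non-mobile token of the nonempty tokens
theorem find_q_filter (ts : List String) :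
    ts.find? pvQ = (ts.filter (fun t => !(t == ""))).find? (fun t => !pv_isMob67 t) := by
  induction ts with
  | nil => rfl
  | cons t rest ih =>
    by_cases he : (t == "") = true
    · rw [List.filter_cons_of_neg (by simp [he]), List.find?_cons_of_neg (by simp [pvQ, he]), ih]
    · rw [List.filter_cons_of_pos (by simp [he])]
      by_cases hm : pv_isMob67 t = true
      · rw [List.find?_cons_of_neg (by simp [pvQ, hm]), List.find?_cons_of_neg (by simp [hm]), ih]
      · rw [List.find?_cons_of_pos (by simp [pvQ, hm, he]), List.find?_cons_of_pos (by simpa using hm)]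

-- the pvGood condition on a list, as used in the induction
def GoodL (ts : List String) : Prop :=
  match ts.findIdx? pvQ with
  | none => ts.all (fun t => !(t == "")) = true
  | some k => (ts.drop (k + 1)).all (fun t => !(t == "")) = true

theorem GoodL_tail (t : String) (ts : List String) (h : pvQ t = false) (hg : GoodL (t :: ts)) :
    GoodL ts := by
  unfold GoodL at hg ⊢
  rw [List.findIdx?_cons, if_neg (by simp [h])] at hg
  cases hf : ts.findIdx? pvQ with
  | none => rw [hf] at hg; simp at hg ⊢; exact hg.2
  | some k => rw [hf] at hg; simpa using hg

-- under GoodL, A's additional-list machine ignores empty tokens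
theorem addSpec_skip (ts : List String) (mo ph : Bool)
    (h1 : ph = true → ts.all (fun t => !(t == "")) = true)
    (h2 : ph = false → GoodL ts) :
    addSpec mo ph ts = addSpec mo ph (ts.filter (fun t => !(t == ""))) := by
  induction ts generalizing mo ph with
  | nil => rfl
  | cons t rest ih =>
    cases hph : ph with
    | true =>
      have hall := h1 hph
      rw [List.filter_eq_self.mpr (by intro a ha; exact (List.all_eq_true.mp hall) a ha)]
    | false =>
      have hg := h2 hph
      by_cases he : (t == "") = true
      · have hm : pv_isMob67 t = false := by
          by_contra h
          rw [mob_ne_empty t (by simpa using h)] at he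
          exact absurd he (by simp)
        rw [List.filter_cons_of_neg (by simp [he])]
        simp only [addSpec, hm, Bool.false_and, if_false, Bool.not_false, Bool.true_and,
          Bool.false_eq_true, he, Bool.not_true]
        exact ih mo false (by simp) (fun _ => GoodL_tail t rest (by simp [pvQ, he]) hg)
      · rw [List.filter_cons_of_pos (by simp [he])]
        by_cases hm : pv_isMob67 t = true
        · simp only [addSpec, hm, Bool.true_and, Bool.not_false, Bool.false_and, Bool.not_true,
            Bool.false_eq_true, if_false]
          have hrest : GoodL rest := GoodL_tail t rest (by simp [pvQ, hm]) hg
          cases mo with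
          | false =>
            simp only [Bool.not_false, if_true]
            exact ih true false (by simp) (fun _ => hrest)
          | true =>
            simp only [Bool.not_true]
            rw [ih true false (by simp) (fun _ => hrest)]
        · have hq : pvQ t = true := by simp [pvQ, hm, he]
          have hall : rest.all (fun t => !(t == "")) = true := by
            unfold GoodL at hg
            rw [List.findIdx?_cons, if_pos hq] at hg
            simpa using hg
          simp only [addSpec, hm, Bool.false_and, Bool.false_eq_true, if_false, Bool.not_false,
            Bool.true_and, he, if_true]
          rw [List.filter_eq_self.mpr (by intro a ha; exact (List.all_eq_true.mp hall) a ha)]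

-- B's index-filtered additional list equals the machine addSpec, over nonempty tokens
theorem key_addB (ts : List String) (k : Nat) (mo ph : Bool) (M P : Option Int)
    (hne : ts.all (fun t => !(t == "")) = true)
    (HMt : mo = true → ∀ i : Int, (k : Int) ≤ i → M ≠ some i)
    (HMf : mo = false → M = (ts.findIdx? pv_isMob67).map (fun n : Nat => (k : Int) + n))
    (HPt : ph = true → ∀ i : Int, (k : Int) ≤ i → P ≠ some i)
    (HPf : ph = false → P = (ts.findIdx? (fun t => !pv_isMob67 t)).map (fun n : Nat => (k : Int) + n)) :
    ((PySem.List.enumerate ts (k : Int)).filter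
        (fun pr => !(M == some pr.1) && !(P == some pr.1))).map (·.2) = addSpec mo ph ts := by
  induction ts generalizing k mo ph M P with
  | nil => simp [PySem.List.enumerate_nil, addSpec]
  | cons t rest ih =>
    have hk1 : (k : Int) + 1 = ((k + 1 : Nat) : Int) := by push_cast; ring
    simp only [List.all_cons, Bool.and_eq_true] at hne
    have hne' : rest.all (fun t => !(t == "")) = true := hne.2
    have hte : (t == "") = false := by simpa using hne.1
    rw [PySem.List.enumerate_cons, List.filter_cons, addSpec, hk1]
    have hMne : mo = true → (M == some (k : Int)) = false := by
      intro hmo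
      cases hM : M with
      | none => rfl
      | some m =>
        simp only [beq_eq_false_iff_ne, ne_eq, Option.some.injEq]
        intro hEq; exact HMt hmo (k : Int) le_rfl (by rw [hM, hEq])
    have hPne : ph = true → (P == some (k : Int)) = false := by
      intro hph
      cases hP : P with
      | none => rfl
      | some m =>
        simp only [beq_eq_false_iff_ne, ne_eq, Option.some.injEq]
        intro hEq; exact HPt hph (k : Int) le_rfl (by rw [hP, hEq])
    by_cases hm : pv_isMob67 t = true
    · have HPf' : ph = false →
          P = (rest.findIdx? (fun t => !pv_isMob67 t)).map (fun n : Nat => ((k + 1 : Nat) : Int) + n) := by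
        intro hph; rw [HPf hph]; exact idxShift _ t rest k (by simp [hm])
      have HPt' : ph = true → ∀ i : Int, ((k + 1 : Nat) : Int) ≤ i → P ≠ some i := by
        intro hph i hi; exact HPt hph i (by push_cast at hi ⊢; omega)
      have hPk : (P == some (k : Int)) = false := by
        cases hph : ph
        · rw [HPf hph]; exact shift_ne_self _ t rest k (by simp [hm])
        · exact hPne hph
      cases hmo : mo with
      | false =>
        have hM : M = some (k : Int) := by
          rw [HMf hmo, List.findIdx?_cons, if_pos hm]; simp
        rw [show (!(M == some ((k : Nat) : Int)) && !(P == some ((k : Nat) : Int))) = false by simp [hM]]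
        rw [if_neg (by simp), if_pos (by simp [hm])]
        refine ih (k + 1) true ph M P hne' ?_ (by simp) HPt' HPf'
        intro _ i hi
        rw [hM]; simp only [ne_eq, Option.some.injEq]
        push_cast at hi; omega
      | true =>
        have hMk := hMne hmo
        rw [show (!(M == some ((k : Nat) : Int)) && !(P == some ((k : Nat) : Int))) = true by simp [hMk, hPk]]
        rw [if_pos (by simp), if_neg (by simp [hm]), if_neg (by simp [hm])]
        rw [List.map_cons]
        congr 1
        refine ih (k + 1) true ph M P hne' ?_ (by simp) HPt' HPf'
        intro _ i hi
        exact HMt hmo i (by push_cast at hi ⊢; omega)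
    · have hm' : pv_isMob67 t = false := by simpa using hm
      have HMf' : mo = false →
          M = (rest.findIdx? pv_isMob67).map (fun n : Nat => ((k + 1 : Nat) : Int) + n) := by
        intro hmo; rw [HMf hmo]; exact idxShift _ t rest k hm'
      have HMt' : mo = true → ∀ i : Int, ((k + 1 : Nat) : Int) ≤ i → M ≠ some i := by
        intro hmo i hi; exact HMt hmo i (by push_cast at hi ⊢; omega)
      have hMk : (M == some (k : Int)) = false := by
        cases hmo : mo
        · rw [HMf hmo]; exact shift_ne_self _ t rest k hm'
        · exact hMne hmo
      cases hph : ph with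
      | false =>
        have hP : P = some (k : Int) := by
          rw [HPf hph, List.findIdx?_cons, if_pos (by simp [hm'])]; simp
        rw [show (!(M == some ((k : Nat) : Int)) && !(P == some ((k : Nat) : Int))) = false by simp [hP]]
        rw [if_neg (by simp), if_neg (by simp [hm']), if_pos (by simp [hm'])]
        rw [show (!(t == "")) = true by simp [hte]]
        refine ih (k + 1) mo true M P hne' HMt' HMf' ?_ (by simp)
        intro _ i hi
        rw [hP]; simp only [ne_eq, Option.some.injEq]
        push_cast at hi; omega
      | true =>
        have hPk := hPne hph
        rw [show (!(M == some ((k : Nat) : Int)) && !(P == some ((k : Nat) : Int))) = true by simp [hMk, hPk]]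
        rw [if_pos (by simp), if_neg (by simp [hm']), if_neg (by simp)]
        rw [List.map_cons]
        congr 1
        refine ih (k + 1) mo true M P hne' HMt' HMf' ?_ (by simp)
        intro _ i hi
        exact HPt hph i (by push_cast at hi ⊢; omega)

-- ===== VERDICT (by name: the statement is the Claim_ definition above) =====
theorem process_phone_numbers_spec : Claim_unchanged_process_phone_numbers := by
  unfold Claim_unchanged_process_phone_numbers
  intro x hdomx
  unfold Spec_process_phone_numbers
  intro hD
  cases x with
  | none => rfl
  | some s =>
    by_cases hs : (s == "") = true
    · simp [process_phone_numbers, process_phone_numbers_alt, pyTruthyS, hs]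
    · have hgood : pvGood s = true := by
        by_contra h
        exact hD ⟨by simpa using hs, by simpa using h⟩
      simp only [process_phone_numbers, process_phone_numbers_alt, pyTruthyS, hs,
        Bool.not_false, if_false, Bool.false_eq_true, Bool.not_true]
      set toks := ((PySem.Str.split? s "/").getD []).map PySem.Str.strip with htoks
      have htoks' : pvToks s = toks := rfl
      set ftoks := toks.filter (fun t => !(t == "")) with hftoks
      rw [pvA_loop_eq_AC, ← htoks, pvAC_char]
      rw [show (PySem.List.enumerate ftoks : List (Int × String)) =
            PySem.List.enumerate ftoks ((0 : Nat) : Int) from rfl]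
      rw [pvB_first_enum pv_isMob67 ftoks, pvB_first_enum (fun t => !pv_isMob67 t) ftoks]
      have hGood : GoodL toks := by
        rw [pvGood_eq s (by simpa [Dom_process_phone_numbers] using hdomx), htoks'] at hgood
        unfold GoodL
        cases hf : toks.findIdx? pvQ <;> rw [hf] at hgood <;> simpa using hgood
      have hadd : addSpec false false toks = addSpec false false ftoks :=
        addSpec_skip toks false false (by simp) (fun _ => hGood)
      have hkey := key_addB ftoks 0 false false
        ((ftoks.findIdx? pv_isMob67).map (fun n : Nat => ((0 : Nat) : Int) + n))
        ((ftoks.findIdx? (fun t => !pv_isMob67 t)).map (fun n : Nat => ((0 : Nat) : Int) + n))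
        (by simp [hftoks]) (by simp) (fun _ => rfl) (by simp) (fun _ => rfl)
      rw [hkey]
      refine Prod.ext ?_ (Prod.ext ?_ ?_)
      · show moRes none toks = _
        have hfind := get_findIdx pv_isMob67 ftoks
        simp only [moRes, pyTruthyS, Bool.false_eq_true, if_false]
        rw [find_mob_filter toks, ← hftoks]
        cases hf : ftoks.findIdx? pv_isMob67 <;> rw [hf] at hfind <;> rw [← hfind] <;> simp
      · show phRes none toks = _
        have hfind := get_findIdx (fun t => !pv_isMob67 t) ftoks
        simp only [phRes, pyTruthyS, Bool.false_eq_true, if_false]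
        rw [find_q_filter toks, ← hftoks]
        cases hf : ftoks.findIdx? (fun t => !pv_isMob67 t) with
        | some n =>
          rw [hf] at hfind
          rw [← hfind]; simp
        | none =>
          rw [hf] at hfind
          have hnof : ftoks.find? (fun t => !pv_isMob67 t) = none := by rw [← hfind]
          -- no real landline token: pvGood forces no empty token, hence no non-mobile token at all
          have hnoq : toks.find? pvQ = none := by rw [find_q_filter toks, ← hftoks, hnof]
          have hallq : ∀ t ∈ toks, pvQ t = false := by
            intro t ht
            have := List.find?_eq_none.mp hnoq t ht
            simpa using this
          have hnoe : toks.all (fun t => !(t == "")) = true := by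
            unfold GoodL at hGood
            rw [List.findIdx?_eq_none_iff.mpr (fun t ht => by simpa using hallq t ht)] at hGood
            exact hGood
          have hany : toks.any (fun t => !pv_isMob67 t) = false := by
            rw [List.any_eq_false]
            intro t ht
            have h1 := hallq t ht
            have h2 := (List.all_eq_true.mp hnoe) t ht
            simp only [pvQ, Bool.and_eq_false_iff] at h1
            rcases h1 with h | h
            · simpa using h
            · simp at h h2; exact absurd h h2
          rw [hnof]
          simp [hany]
      · simp only [show pyTruthyS (none : Option String) = false from rfl, List.nil_append]
        rw [hadd]

theorem process_phone_numbers_changed : Claim_changed_process_phone_numbers := by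
  unfold Claim_changed_process_phone_numbers; decide
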